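-- pv_equiv track=rewrite | github.com/antrcode/grad-cert | project-login/task-5.py | robbie_movement
-- ===== SOURCE A (Python) =====
-- def find_key_position(key: str, keyboard: list[str]) -> tuple[int, int]:
--     """
--     Find the row (r) and column (c) of a key on the keyboard.
--     Returns [row, column].
--     """
--     for r in range(len(keyboard)):
--         for c in range(len(keyboard[r])):
--             if keyboard[r][c] == key:
--                 return r, c
--     return None
--
-- def robbie_movement(enter_string: str, keyboard: list[str]) -> str:
--     """
--     Compute and returns the sequence of actions Robbie must take to type the string.
--     Actions: 'r' = move right, 'l' = move left, 'u' = move up, 'd' = move down, 'p' = press key.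
--     Robbie always starts at the top left position of the chosen keyboard.
--     """
--     current_row, current_col = 0, 0 # start at top left position of keyboard
--     actions = "" # actions stored as a string
--
--     for char in enter_string:
--         target_row, target_col = find_key_position(char, keyboard)
--
--         # move horizontally first
--         while current_col < target_col:
--             actions += "r"
--             current_col += 1
--         while current_col > target_col:
--             actions += "l"
--             current_col -= 1
--
--         # then move vertically next
--         while current_row < target_row:
--             actions += "d"
--             current_row += 1
--         while current_row > target_row:
--             actions += "u"
--             current_row -= 1
--
--         # p to press the key when in correct position
--         actions += "p"
--
--     return actions
-- ===== SOURCE B (Python) =====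
-- def robbie_movement(enter_string: str, keyboard: list[str]) -> str:
--     """
--     Same task, simpler decomposition: index every key's first position once,
--     then emit each move run in closed form instead of four incremental while-loops.
--     """
--     pos = {}
--     r = 0
--     for row in keyboard:
--         c = 0
--         for ch in row:
--             if ch not in pos:
--                 pos[ch] = (r, c)
--             c += 1
--         r += 1
--     actions = ""
--     cur_row = cur_col = 0
--     for char in enter_string:
--         tr, tc = pos[char]
--         dc = tc - cur_col
--         dr = tr - cur_row
--         actions += ("r" if dc > 0 else "l") * abs(dc)
--         actions += ("d" if dr > 0 else "u") * abs(dr) + "p"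
--         cur_row, cur_col = tr, tc
--     return actions
-- ===== Notes on version B (the rewrite author's own statement) =====
-- stated objective: faster
-- what changed: B builds a first-occurrence position index of the keyboard once and emits each horizontal/vertical run by string multiplication in closed form, replacing A's per-character nested keyboard scan and four incremental while-loops.
import Mathlib
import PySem

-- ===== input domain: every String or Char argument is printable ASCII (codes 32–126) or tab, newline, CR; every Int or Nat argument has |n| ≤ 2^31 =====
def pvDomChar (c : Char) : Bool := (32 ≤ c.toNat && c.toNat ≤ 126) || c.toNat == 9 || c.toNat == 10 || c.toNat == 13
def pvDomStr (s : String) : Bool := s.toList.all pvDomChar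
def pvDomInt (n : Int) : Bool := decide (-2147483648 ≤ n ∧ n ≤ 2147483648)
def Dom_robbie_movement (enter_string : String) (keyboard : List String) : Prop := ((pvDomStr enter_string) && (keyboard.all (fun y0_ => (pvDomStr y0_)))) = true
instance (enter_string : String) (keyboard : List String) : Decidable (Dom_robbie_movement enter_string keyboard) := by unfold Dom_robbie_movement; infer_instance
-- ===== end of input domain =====

-- B replaces the per-character keyboard scan by a prebuilt first-occurrence index and the four
-- incremental while-loops by closed-form string repetition (objective: simpler).

-- ===== PORT A =====
-- find_key_position: inner loop over one row (c index), outer loop over rows (r index)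
def fkpRow (key : Char) (row : List Char) (c : Int) : Option Int :=
  match row with
  | [] => none
  | ch :: rest => if ch = key then some c else fkpRow key rest (c + 1)

def fkp (key : Char) (rows : List String) (r : Int) : Option (Int × Int) :=
  match rows with
  | [] => none
  | row :: rest =>
    match fkpRow key row.toList 0 with
    | some c => some (r, c)
    | none => fkp key rest (r + 1)

-- the four while-loops of A, one function each
def moveR (col target : Int) (acts : String) : Int × String :=
  if col < target then moveR (col + 1) target (acts ++ "r") else (col, acts)
termination_by (target - col).toNat
decreasing_by omega

def moveL (col target : Int) (acts : String) : Int × String :=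
  if col > target then moveL (col - 1) target (acts ++ "l") else (col, acts)
termination_by (col - target).toNat
decreasing_by omega

def moveD (row target : Int) (acts : String) : Int × String :=
  if row < target then moveD (row + 1) target (acts ++ "d") else (row, acts)
termination_by (target - row).toNat
decreasing_by omega

def moveU (row target : Int) (acts : String) : Int × String :=
  if row > target then moveU (row - 1) target (acts ++ "u") else (row, acts)
termination_by (row - target).toNat
decreasing_by omega

-- loop body of A; on a missing key Python raises TypeError (excluded by Pre_), the port keeps the state
def stepA (keyboard : List String) (st : Int × Int × String) (ch : Char) : Int × Int × String :=
  match fkp ch keyboard 0 with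
  | none => st
  | some (tr, tc) =>
    let p1 := moveR st.2.1 tc st.2.2
    let p2 := moveL p1.1 tc p1.2
    let p3 := moveD st.1 tr p2.2
    let p4 := moveU p3.1 tr p3.2
    (p4.1, p2.1, p4.2 ++ "p")

def robbie_movement (enter_string : String) (keyboard : List String) : String :=
  (enter_string.toList.foldl (stepA keyboard) (0, 0, "")).2.2

-- ===== PORT B =====
-- Python's s * n for n : Int ("r" * abs(dc) etc.)
def strRepeatN (s : String) : Nat → String
  | 0 => ""
  | k + 1 => s ++ strRepeatN s k

def strRepeat (s : String) (n : Int) : String := strRepeatN s n.toNat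

-- inner loop of B's index builder: 'for ch in row: if ch not in pos: pos[ch] = (r, c); c += 1'
def addRow (d : PySem.Dict Char (Int × Int)) (r c : Int) (row : List Char) : PySem.Dict Char (Int × Int) :=
  match row with
  | [] => d
  | ch :: rest =>
    addRow (if d.contains ch then d else d.insert ch (r, c)) r (c + 1) rest

-- outer loop: 'for row in keyboard: …; r += 1'
def buildPos (d : PySem.Dict Char (Int × Int)) (r : Int) (rows : List String) : PySem.Dict Char (Int × Int) :=
  match rows with
  | [] => d
  | row :: rest => buildPos (addRow d r 0 row.toList) (r + 1) rest

-- loop body of B; on a missing key Python raises KeyError (excluded by Pre_), the port keeps the state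
def stepB (pos : PySem.Dict Char (Int × Int)) (st : Int × Int × String) (ch : Char) : Int × Int × String :=
  match pos.get? ch with
  | none => st
  | some (tr, tc) =>
    let dc := tc - st.2.1
    let dr := tr - st.1
    (tr, tc, st.2.2 ++ strRepeat (if dc > 0 then "r" else "l") |dc|
                    ++ (strRepeat (if dr > 0 then "d" else "u") |dr| ++ "p"))

def robbie_movement_alt (enter_string : String) (keyboard : List String) : String :=
  let pos := buildPos PySem.Dict.empty 0 keyboard
  (enter_string.toList.foldl (stepB pos) (0, 0, "")).2.2

-- ===== PRECONDITION & SPEC =====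
-- Pre_ excludes inputs with a character of enter_string absent from the keyboard: there Python A
-- raises TypeError (unpacking None) and Python B raises KeyError.
def Pre_robbie_movement (enter_string : String) (keyboard : List String) : Prop :=
  (enter_string.toList.all (fun ch => keyboard.any (fun row => row.toList.contains ch))) = true
instance (enter_string : String) (keyboard : List String) : Decidable (Pre_robbie_movement enter_string keyboard) := by unfold Pre_robbie_movement; infer_instance

def pvWitness_robbie_movement : String × List String := ("abba b", ["ab c", "xy"])

def Spec_robbie_movement (enter_string : String) (keyboard : List String) (out : String) : Prop := out = robbie_movement_alt enter_string keyboard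
instance (enter_string : String) (keyboard : List String) (out : String) : Decidable (Spec_robbie_movement enter_string keyboard out) := by unfold Spec_robbie_movement; infer_instance

-- ===== CLAIM (what is proved, stated in full; the proofs are below) =====
def Claim_equal_robbie_movement : Prop := ∀ (enter_string : String) (keyboard : List String), Dom_robbie_movement enter_string keyboard → Pre_robbie_movement enter_string keyboard → Spec_robbie_movement enter_string keyboard (robbie_movement enter_string keyboard)

-- ===== LEMMAS AND PROOFS =====

-- the two lookups agree: the index built first-come-first-kept returns the first occurrence
theorem addRow_get? (key : Char) (row : List Char) (d : PySem.Dict Char (Int × Int)) (r c : Int) :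
    (addRow d r c row).get? key =
      match d.get? key with
      | some v => some v
      | none => (fkpRow key row c).map (fun cc => (r, cc)) := by
  induction row generalizing d c with
  | nil => simp only [addRow, fkpRow]; cases d.get? key <;> rfl
  | cons ch rest ih =>
    simp only [addRow, fkpRow]
    rw [ih]
    by_cases hc : d.contains ch
    · rw [if_pos hc]
      by_cases hk : ch = key
      · subst hk
        rw [if_pos rfl]
        cases hg : d.get? ch with
        | none => rw [PySem.Dict.get?_eq_none_iff_contains] at hg; simp [hg] at hc
        | some v => rfl
      · rw [if_neg hk]
    · rw [if_neg hc]
      by_cases hk : ch = key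
      · subst hk
        rw [if_pos rfl]
        have hg : d.get? ch = none := (PySem.Dict.get?_eq_none_iff_contains d ch).mpr (by simpa using hc)
        rw [PySem.Dict.get?_insert_self, hg]
        rfl
      · rw [if_neg hk, PySem.Dict.get?_insert_of_ne d (r, c) (show key ≠ ch from fun h => hk h.symm)]

theorem buildPos_get? (key : Char) (rows : List String) (d : PySem.Dict Char (Int × Int)) (r : Int) :
    (buildPos d r rows).get? key =
      match d.get? key with
      | some v => some v
      | none => fkp key rows r := by
  induction rows generalizing d r with
  | nil => simp only [buildPos, fkp]; cases d.get? key <;> rfl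
  | cons row rest ih =>
    simp only [buildPos, fkp]
    rw [ih, addRow_get?]
    cases d.get? key with
    | some v => rfl
    | none => cases fkpRow key row.toList 0 <;> rfl

theorem lookup_agree (key : Char) (rows : List String) :
    (buildPos PySem.Dict.empty 0 rows).get? key = fkp key rows 0 := by
  rw [buildPos_get?]
  simp [PySem.Dict.get?_empty]

-- closed forms of the four while-loops
theorem strRepeatN_succ_app (s acts : String) (n : Nat) :
    acts ++ strRepeatN s (n + 1) = (acts ++ s) ++ strRepeatN s n := by
  simp [strRepeatN, String.append_assoc]

theorem moveR_lt (n : Nat) : ∀ (col : Int) (acts : String),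
    moveR col (col + n) acts = (col + n, acts ++ strRepeatN "r" n) := by
  induction n with
  | zero => intro col acts; rw [moveR]; simp [strRepeatN]
  | succ n ih =>
    intro col acts
    rw [moveR]
    have h : col < col + (n + 1 : Nat) := by omega
    rw [if_pos h]
    have : col + (n + 1 : Nat) = (col + 1) + n := by push_cast; ring
    rw [this, ih]
    rw [strRepeatN_succ_app]

theorem moveR_ge (col target : Int) (acts : String) (h : target ≤ col) :
    moveR col target acts = (col, acts) := by
  rw [moveR]; rw [if_neg (by omega)]

theorem moveL_gt (n : Nat) : ∀ (col : Int) (acts : String),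
    moveL col (col - n) acts = (col - n, acts ++ strRepeatN "l" n) := by
  induction n with
  | zero => intro col acts; rw [moveL]; simp [strRepeatN]
  | succ n ih =>
    intro col acts
    rw [moveL]
    have h : col - (n + 1 : Nat) < col := by omega
    rw [if_pos (by omega)]
    have : col - (n + 1 : Nat) = (col - 1) - n := by push_cast; ring
    rw [this, ih]
    rw [strRepeatN_succ_app]

theorem moveL_le (col target : Int) (acts : String) (h : col ≤ target) :
    moveL col target acts = (col, acts) := by
  rw [moveL]; rw [if_neg (by omega)]

theorem moveD_lt (n : Nat) : ∀ (row : Int) (acts : String),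
    moveD row (row + n) acts = (row + n, acts ++ strRepeatN "d" n) := by
  induction n with
  | zero => intro row acts; rw [moveD]; simp [strRepeatN]
  | succ n ih =>
    intro row acts
    rw [moveD]
    rw [if_pos (by omega)]
    have : row + (n + 1 : Nat) = (row + 1) + n := by push_cast; ring
    rw [this, ih]
    rw [strRepeatN_succ_app]

theorem moveD_ge (row target : Int) (acts : String) (h : target ≤ row) :
    moveD row target acts = (row, acts) := by
  rw [moveD]; rw [if_neg (by omega)]

theorem moveU_gt (n : Nat) : ∀ (row : Int) (acts : String),
    moveU row (row - n) acts = (row - n, acts ++ strRepeatN "u" n) := by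
  induction n with
  | zero => intro row acts; rw [moveU]; simp [strRepeatN]
  | succ n ih =>
    intro row acts
    rw [moveU]
    rw [if_pos (by omega)]
    have : row - (n + 1 : Nat) = (row - 1) - n := by push_cast; ring
    rw [this, ih]
    rw [strRepeatN_succ_app]

theorem moveU_le (row target : Int) (acts : String) (h : row ≤ target) :
    moveU row target acts = (row, acts) := by
  rw [moveU]; rw [if_neg (by omega)]

-- horizontal pair of while-loops = one closed-form run
theorem horiz_eq (col target : Int) (acts : String) :
    moveL (moveR col target acts).1 target (moveR col target acts).2 =
      (target, acts ++ strRepeat (if target - col > 0 then "r" else "l") |target - col|) := by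
  rcases lt_trichotomy col target with h | h | h
  · obtain ⟨n, hn⟩ : ∃ n : Nat, target = col + n := ⟨(target - col).toNat, by omega⟩
    subst hn
    rw [moveR_lt]
    rw [moveL_le _ _ _ le_rfl]
    have h1 : col + (n : Int) - col > 0 := by omega
    rw [if_pos h1]
    simp [strRepeat]
  · subst h
    rw [moveR_ge _ _ _ le_rfl, moveL_le _ _ _ le_rfl]
    simp [strRepeat, strRepeatN]
  · obtain ⟨n, hn⟩ : ∃ n : Nat, target = col - n := ⟨(col - target).toNat, by omega⟩
    subst hn
    rw [moveR_ge _ _ _ (by omega)]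
    rw [moveL_gt]
    have h1 : ¬ (col - (n : Int) - col > 0) := by omega
    rw [if_neg h1]
    simp [strRepeat]

theorem vert_eq (row target : Int) (acts : String) :
    moveU (moveD row target acts).1 target (moveD row target acts).2 =
      (target, acts ++ strRepeat (if target - row > 0 then "d" else "u") |target - row|) := by
  rcases lt_trichotomy row target with h | h | h
  · obtain ⟨n, hn⟩ : ∃ n : Nat, target = row + n := ⟨(target - row).toNat, by omega⟩
    subst hn
    rw [moveD_lt]
    rw [moveU_le _ _ _ le_rfl]
    rw [if_pos (by omega)]
    simp [strRepeat]
  · subst h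
    rw [moveD_ge _ _ _ le_rfl, moveU_le _ _ _ le_rfl]
    simp [strRepeat, strRepeatN]
  · obtain ⟨n, hn⟩ : ∃ n : Nat, target = row - n := ⟨(row - target).toNat, by omega⟩
    subst hn
    rw [moveD_ge _ _ _ (by omega)]
    rw [moveU_gt]
    rw [if_neg (by omega)]
    simp [strRepeat]

theorem step_agree (keyboard : List String) (st : Int × Int × String) (ch : Char) :
    stepA keyboard st ch = stepB (buildPos PySem.Dict.empty 0 keyboard) st ch := by
  unfold stepA stepB
  rw [lookup_agree]
  cases hf : fkp ch keyboard 0 with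
  | none => rfl
  | some p =>
    obtain ⟨tr, tc⟩ := p
    simp only
    have hh := horiz_eq st.2.1 tc st.2.2
    have hv := vert_eq st.1 tr (moveL (moveR st.2.1 tc st.2.2).1 tc (moveR st.2.1 tc st.2.2).2).2
    rw [hh] at hv ⊢
    simp only at hv ⊢
    rw [hv]
    simp [String.append_assoc]

theorem robbie_fold_agree (cs : List Char) (keyboard : List String) (st : Int × Int × String) :
    cs.foldl (stepA keyboard) st = cs.foldl (stepB (buildPos PySem.Dict.empty 0 keyboard)) st := by
  induction cs generalizing st with
  | nil => rfl
  | cons c rest ih => simp only [List.foldl]; rw [step_agree, ih]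

-- ===== VERDICT (by name: the statement is the Claim_ definition above) =====
theorem robbie_movement_spec : Claim_equal_robbie_movement := by
  intro enter_string keyboard _ _
  unfold Spec_robbie_movement robbie_movement robbie_movement_alt
  rw [robbie_fold_agree]
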